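-- pv_equiv track=rewrite | github.com/wildsrincon/smart-docs-rag | backend/app/rag/chunker.py | split_text_by_paragraphs
-- ===== SOURCE A (Python) =====
-- def split_text_by_paragraphs(text: str) -> list[str]:
--     """Split text into paragraphs"""
--     # Split by double newlines or single newlines followed by whitespace
--     paragraphs = []
--     current_paragraph = ""
--
--     for line in text.split("\n"):
--         stripped_line = line.strip()
--         if stripped_line:
--             current_paragraph += stripped_line + " "
--         else:
--             if current_paragraph.strip():
--                 paragraphs.append(current_paragraph.strip())
--                 current_paragraph = ""
--
--     if current_paragraph.strip():
--         paragraphs.append(current_paragraph.strip())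
--
--     return paragraphs if paragraphs else [text]
-- ===== SOURCE B (Python) =====
-- def split_text_by_paragraphs(text: str) -> list[str]:
--     """Split text into paragraphs (two-pointer run scan over pre-stripped lines)."""
--     lines = [line.strip() for line in text.split("\n")]
--     n = len(lines)
--     paragraphs = []
--     i = 0
--     while i < n:
--         if lines[i]:
--             j = i + 1
--             while j < n and lines[j]:
--                 j += 1
--             paragraphs.append(" ".join(lines[i:j]))
--             i = j
--         else:
--             i += 1
--     return paragraphs if paragraphs else [text]
-- ===== Notes on version B (the rewrite author's own statement) =====
-- stated objective: alternative
-- what changed: A accumulates a growing paragraph string (appending each stripped line plus a space, re-stripping it at every blank line); B pre-strips all lines once and does a two-pointer index scan that finds each maximal run of non-blank lines and joins the whole run with a single space-join.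
import Mathlib
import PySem

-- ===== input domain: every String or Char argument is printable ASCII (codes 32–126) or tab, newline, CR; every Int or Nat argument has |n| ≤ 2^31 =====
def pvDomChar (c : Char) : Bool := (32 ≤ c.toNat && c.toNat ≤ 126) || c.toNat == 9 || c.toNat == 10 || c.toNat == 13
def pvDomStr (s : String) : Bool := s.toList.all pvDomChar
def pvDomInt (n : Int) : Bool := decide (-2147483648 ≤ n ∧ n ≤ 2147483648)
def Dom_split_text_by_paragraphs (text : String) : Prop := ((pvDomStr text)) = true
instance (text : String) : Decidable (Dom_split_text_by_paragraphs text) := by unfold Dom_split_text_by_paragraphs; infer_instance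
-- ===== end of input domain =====

-- B replaces A's paragraph-string accumulator loop with a two-pointer run scan over
-- pre-stripped lines, joining each maximal non-blank run at once (alternative decomposition, same cost).

-- ===== PORT A =====
-- the body of A's `for line in text.split("\n")` loop, verbatim
def pvStepA (st : List String × String) (line : String) : List String × String :=
  let stripped_line := PySem.Str.strip line
  if stripped_line ≠ "" then
    (st.1, st.2 ++ stripped_line ++ " ")
  else
    if PySem.Str.strip st.2 ≠ "" then (st.1 ++ [PySem.Str.strip st.2], "") else st

def split_text_by_paragraphs (text : String) : List String :=
  -- text.split("\n"): the separator is the nonempty literal "\n", so split? is always `some`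
  let st := ((PySem.Str.split? text "\n").getD []).foldl pvStepA ([], "")
  let paragraphs := if PySem.Str.strip st.2 ≠ "" then st.1 ++ [PySem.Str.strip st.2] else st.1
  if paragraphs ≠ [] then paragraphs else [text]

-- ===== PORT B =====

def pvRunEnd (lines : List String) (n j : Nat) : Nat :=
  if h : j < n ∧ lines.getD j "" ≠ "" then pvRunEnd lines n (j+1) else j
  termination_by n - j
  decreasing_by omega

theorem le_pvRunEnd (lines : List String) (n j : Nat) : j ≤ pvRunEnd lines n j := by
  unfold pvRunEnd
  split
  · have := le_pvRunEnd lines n (j+1); omega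
  · omega
  termination_by n - j
  decreasing_by omega

def pvCollect (lines : List String) (n i : Nat) (acc : List String) : List String :=
  if h : i < n then
    if lines.getD i "" ≠ "" then
      let j := pvRunEnd lines n (i+1)
      pvCollect lines n j (acc ++ [PySem.Str.join " " ((lines.drop i).take (j - i))])
    else pvCollect lines n (i+1) acc
  else acc
  termination_by n - i
  decreasing_by
  · have := le_pvRunEnd lines n (i+1); omega
  · omega


def split_text_by_paragraphs_alt (text : String) : List String :=
  let lines := ((PySem.Str.split? text "\n").getD []).map PySem.Str.strip
  -- lines[i:j] for 0 ≤ i ≤ j is (lines.drop i).take (j - i)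
  let paragraphs := pvCollect lines lines.length 0 []
  if paragraphs ≠ [] then paragraphs else [text]

-- ===== PRECONDITION & SPEC =====
def Spec_split_text_by_paragraphs (text : String) (out : List String) : Prop := out = split_text_by_paragraphs_alt text
instance (text : String) (out : List String) : Decidable (Spec_split_text_by_paragraphs text out) := by unfold Spec_split_text_by_paragraphs; infer_instance

-- ===== CLAIM (what is proved, stated in full; the proofs are below) =====
def Claim_equal_split_text_by_paragraphs : Prop := ∀ (text : String), Dom_split_text_by_paragraphs text → Spec_split_text_by_paragraphs text (split_text_by_paragraphs text)

-- ===== LEMMAS AND PROOFS =====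
def pvClean (cs : List Char) : Prop := PySem.Chars.lstrip cs = cs ∧ PySem.Chars.rstrip cs = cs

theorem pv_dropWhile_idem (p : Char → Bool) (l : List Char) :
    (l.dropWhile p).dropWhile p = l.dropWhile p := by
  induction l with
  | nil => simp
  | cons a t ih => by_cases h : p a <;> simp [h, ih]

theorem pv_head?_of_prefix {u v : List Char} (h : u <+: v) (hu : u ≠ []) : u.head? = v.head? := by
  obtain ⟨t, rfl⟩ := h; cases u with
  | nil => exact absurd rfl hu
  | cons a u => simp

theorem pv_dropWhile_eq_self_of_prefix {p : Char → Bool} {u v : List Char}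
    (hv : v.dropWhile p = v) (h : u <+: v) : u.dropWhile p = u := by
  cases u with
  | nil => simp
  | cons a u =>
    cases v with
    | nil => simp [List.prefix_nil] at h
    | cons b w =>
      have hab : a = b := by
        have := pv_head?_of_prefix h (by simp)
        simpa using this
      subst hab
      rw [List.dropWhile_eq_self_iff] at hv ⊢
      intro _; simpa using hv (by simp)

theorem pv_rstrip_prefix (y : List Char) : PySem.Chars.rstrip y <+: y := by
  have h := List.dropWhile_suffix (l := y.reverse) PySem.Chars.isspace
  have := List.reverse_prefix.mpr (by simpa using h)
  simpa [PySem.Chars.rstrip] using this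

theorem pvClean_strip (cs : List Char) : pvClean (PySem.Chars.strip cs) := by
  constructor
  · exact pv_dropWhile_eq_self_of_prefix (pv_dropWhile_idem _ cs) (pv_rstrip_prefix _)
  · simp [PySem.Chars.strip, PySem.Chars.rstrip, pv_dropWhile_idem]

def pvJoinC (ws : List (List Char)) : List Char := PySem.Chars.join [' '] ws

def pvWords (ws : List (List Char)) : Prop := ∀ w ∈ ws, pvClean w ∧ w ≠ []

theorem pv_isspace_space : PySem.Chars.isspace ' ' = true := by decide

theorem pv_joinC_append_singleton (ws : List (List Char)) (s : List Char) :
    pvJoinC (ws ++ [s]) = if ws = [] then s else pvJoinC ws ++ ' ' :: s := by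
  induction ws with
  | nil => simp [pvJoinC, PySem.Chars.join_singleton]
  | cons a t ih =>
    cases t with
    | nil => simp [pvJoinC, PySem.Chars.join_cons_cons, PySem.Chars.join_singleton]
    | cons b t' =>
      simp only [List.cons_append, pvJoinC, PySem.Chars.join_cons_cons] at *
      simp [ih]

theorem pv_rstrip_append_of_ne_nil (x y : List Char) (h : PySem.Chars.rstrip y ≠ []) :
    PySem.Chars.rstrip (x ++ y) = x ++ PySem.Chars.rstrip y := by
  simp only [PySem.Chars.rstrip] at *
  rw [List.reverse_append, List.dropWhile_append]
  have : (List.dropWhile PySem.Chars.isspace y.reverse).isEmpty = false := by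
    cases hd : List.dropWhile PySem.Chars.isspace y.reverse <;> simp_all
  simp [this]

theorem pv_rstrip_append_space (x : List Char) :
    PySem.Chars.rstrip (x ++ [' ']) = PySem.Chars.rstrip x := by
  simp [PySem.Chars.rstrip, List.dropWhile_cons, pv_isspace_space]

theorem pv_lstrip_cons_not_space (c : Char) (t : List Char) (h : PySem.Chars.isspace c = false) :
    PySem.Chars.lstrip (c :: t) = c :: t := by
  simp [PySem.Chars.lstrip, List.dropWhile_cons, h]

theorem pv_clean_head (c : Char) (w : List Char) (h : pvClean (c :: w)) :
    PySem.Chars.isspace c = false := by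
  have := h.1
  by_cases hc : PySem.Chars.isspace c
  · simp only [PySem.Chars.lstrip, List.dropWhile_cons, hc, if_true] at this
    have := congrArg List.length this
    have hl := List.length_dropWhile_le PySem.Chars.isspace w
    simp at this; omega
  · simpa using hc

theorem pv_rstrip_joinC (ws : List (List Char)) (hne : ws ≠ []) (hw : pvWords ws) :
    PySem.Chars.rstrip (pvJoinC ws) = pvJoinC ws ∧ pvJoinC ws ≠ [] := by
  induction ws with
  | nil => exact absurd rfl hne
  | cons a t ih =>
    cases t with
    | nil =>
      have := hw a (by simp)
      simpa [pvJoinC, PySem.Chars.join_singleton] using ⟨this.1.2, this.2⟩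
    | cons b t' =>
      have ih' := ih (by simp) (fun w hwm => hw w (by simp [hwm]))
      have ha := hw a (by simp)
      constructor
      · rw [pvJoinC, PySem.Chars.join_cons_cons]
        show PySem.Chars.rstrip ((a ++ [' ']) ++ pvJoinC (b :: t')) = _
        rw [show PySem.Chars.join [' '] (b :: t') = pvJoinC (b :: t') from rfl]
        rw [pv_rstrip_append_of_ne_nil _ _ (by rw [ih'.1]; exact ih'.2), ih'.1]
      · rw [pvJoinC, PySem.Chars.join_cons_cons]
        intro hcon
        have := ha.2
        simp_all

theorem pv_joinC_cons_eq_append (a : List Char) (t : List (List Char)) :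
    ∃ X, pvJoinC (a :: t) = a ++ X := by
  cases t with
  | nil => exact ⟨[], by simp [pvJoinC, PySem.Chars.join_singleton]⟩
  | cons b t' => exact ⟨' ' :: pvJoinC (b :: t'), by simp [pvJoinC, PySem.Chars.join_cons_cons]⟩

theorem pv_strip_run (ws : List (List Char)) (hne : ws ≠ []) (hw : pvWords ws) :
    PySem.Chars.strip (pvJoinC ws ++ [' ']) = pvJoinC ws ∧ pvJoinC ws ≠ [] := by
  obtain ⟨a, t, rfl⟩ : ∃ a t, ws = a :: t := by cases ws with
    | nil => exact absurd rfl hne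
    | cons a t => exact ⟨a, t, rfl⟩
  have ha := hw a (by simp)
  obtain ⟨c, a', rfl⟩ : ∃ c a', a = c :: a' := by cases a with
    | nil => exact absurd rfl ha.2
    | cons c a' => exact ⟨c, a', rfl⟩
  obtain ⟨X, hX⟩ := pv_joinC_cons_eq_append (c :: a') t
  have hrs := pv_rstrip_joinC ((c :: a') :: t) (by simp) hw
  refine ⟨?_, hrs.2⟩
  rw [PySem.Chars.strip, hX]
  rw [show (c :: a' ++ X) ++ [' '] = c :: (a' ++ X ++ [' ']) by simp]
  rw [pv_lstrip_cons_not_space c _ (pv_clean_head c a' ha.1)]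
  rw [show c :: (a' ++ X ++ [' ']) = (c :: (a' ++ X)) ++ [' '] by simp]
  rw [pv_rstrip_append_space, show (c :: (a' ++ X)) = pvJoinC ((c :: a') :: t) by simp [hX]]
  exact hrs.1.trans hX

def pvJoined (ws : List String) : String := PySem.Str.join " " ws
def pvCurOf (ws : List String) : String := if ws = [] then "" else pvJoined ws ++ " "
def pvWordsS (ws : List String) : Prop := ∀ w ∈ ws, pvClean w.toList ∧ w ≠ ""

theorem pv_toList_joined (ws : List String) :
    (pvJoined ws).toList = pvJoinC (ws.map String.toList) := by
  rw [pvJoined, PySem.Str.toList_join]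
  rfl

theorem pv_curOf_append (ws : List String) (s : String) :
    pvCurOf ws ++ s ++ " " = pvCurOf (ws ++ [s]) := by
  rw [← String.toList_inj]
  by_cases h : ws = []
  · subst h
    simp only [pvCurOf, List.nil_append, if_neg (by simp : ¬([s] : List String) = []),
      String.toList_append, pv_toList_joined, List.map_cons, List.map_nil]
    simp [pvJoinC, PySem.Chars.join_singleton]
  · simp only [pvCurOf, if_neg h, if_neg (by simp : ¬(ws ++ [s]) = []),
      String.toList_append, pv_toList_joined, List.map_append, List.map_cons, List.map_nil,
      pv_joinC_append_singleton]
    simp [h]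

theorem pv_strip_empty : PySem.Str.strip "" = "" := by decide

theorem pv_strip_curOf (ws : List String) (hne : ws ≠ []) (hw : pvWordsS ws) :
    PySem.Str.strip (pvCurOf ws) = pvJoined ws ∧ pvJoined ws ≠ "" := by
  have hw' : pvWords (ws.map String.toList) := by
    intro w hwm
    simp only [List.mem_map] at hwm
    obtain ⟨x, hx, rfl⟩ := hwm
    exact ⟨(hw x hx).1, fun hc => (hw x hx).2 (String.toList_eq_nil_iff.mp hc)⟩
  have hr := pv_strip_run (ws.map String.toList) (by simpa using hne) hw'
  constructor
  · rw [← String.toList_inj]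
    rw [PySem.Str.toList_strip]
    simp only [pvCurOf, if_neg hne, String.toList_append, pv_toList_joined]
    simpa using hr.1
  · intro hcon
    apply hr.2
    rw [← pv_toList_joined, hcon]
    rfl

def pvRefP : List String → List String → List String
  | ws, [] => if ws = [] then [] else [pvJoined ws]
  | ws, l :: ls =>
    if l = "" then (if ws = [] then [] else [pvJoined ws]) ++ pvRefP [] ls
    else pvRefP (ws ++ [l]) ls

def pvRef : List String → List String
  | [] => []
  | l :: ls =>
    if l = "" then pvRef ls
    else PySem.Str.join " " (l :: ls.takeWhile (· ≠ "")) :: pvRef (ls.dropWhile (· ≠ ""))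
  termination_by ls => ls.length
  decreasing_by
  · simp
  · have := List.length_dropWhile_le (fun l => decide ¬l = "") ls; simp at this ⊢; omega

theorem pvA_main (ls : List String) : ∀ (acc ws : List String), pvWordsS ws →
    (let st := ls.foldl pvStepA (acc, pvCurOf ws);
     if PySem.Str.strip st.2 ≠ "" then st.1 ++ [PySem.Str.strip st.2] else st.1)
    = acc ++ pvRefP ws (ls.map PySem.Str.strip) := by
  induction ls with
  | nil =>
    intro acc ws hw
    by_cases h : ws = []
    · subst h; simp [pvCurOf, pv_strip_empty, pvRefP]
    · have := pv_strip_curOf ws h hw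
      simp [this.1, this.2, pvRefP, h]
  | cons l ls ih =>
    intro acc ws hw
    simp only [List.foldl_cons, List.map_cons]
    by_cases hs : PySem.Str.strip l = ""
    · -- stripped line empty
      by_cases h : ws = []
      · subst h
        have : pvStepA (acc, pvCurOf []) l = (acc, pvCurOf []) := by
          simp [pvStepA, hs, pvCurOf, pv_strip_empty]
        rw [this, ih acc [] (by intro w hwm; simp at hwm)]
        simp [pvRefP, hs]
      · have hc := pv_strip_curOf ws h hw
        have : pvStepA (acc, pvCurOf ws) l = (acc ++ [pvJoined ws], pvCurOf []) := by
          simp [pvStepA, hs, hc.1, hc.2, show pvCurOf ([] : List String) = "" from rfl]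
        rw [this, ih (acc ++ [pvJoined ws]) [] (by intro w hwm; simp at hwm)]
        simp [pvRefP, hs, h]
    · -- stripped line nonempty
      have : pvStepA (acc, pvCurOf ws) l = (acc, pvCurOf (ws ++ [PySem.Str.strip l])) := by
        simp [pvStepA, hs, pv_curOf_append]
      rw [this, ih acc (ws ++ [PySem.Str.strip l]) ?_]
      · simp [pvRefP, hs]
      · intro w hwm
        rcases List.mem_append.mp hwm with h1 | h2
        · exact hw w h1
        · simp at h2; subst h2
          exact ⟨by rw [PySem.Str.toList_strip]; exact pvClean_strip _, hs⟩

theorem pvRefP_both (ls : List String) :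
    (pvRefP [] ls = pvRef ls) ∧
    ∀ ws : List String, ws ≠ [] →
      pvRefP ws ls = pvJoined (ws ++ ls.takeWhile (· ≠ "")) :: pvRef (ls.dropWhile (· ≠ "")) := by
  induction ls with
  | nil => exact ⟨by simp [pvRefP, pvRef], fun ws h => by simp [pvRefP, pvRef, h]⟩
  | cons l ls ih =>
    constructor
    · by_cases hl : l = ""
      · subst hl; simp [pvRefP, pvRef, ih.1]
      · simp only [pvRefP, if_neg hl, List.nil_append]
        rw [ih.2 [l] (by simp)]
        simp [pvRef, hl, pvJoined]
    · intro ws h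
      by_cases hl : l = ""
      · subst hl
        simp [pvRefP, pvRef, h, ih.1]
      · simp only [pvRefP, if_neg hl]
        rw [ih.2 (ws ++ [l]) (by simp)]
        simp [hl]

theorem pv_dropWhile_eq_drop (p : String → Bool) (l : List String) :
    l.dropWhile p = l.drop (l.takeWhile p).length := by
  induction l with
  | nil => simp
  | cons a t ih =>
    by_cases h : p a <;> simp [h, ih]

theorem pvRunEnd_spec (lines : List String) (j : Nat) (h : j ≤ lines.length) :
    pvRunEnd lines lines.length j = j + ((lines.drop j).takeWhile (· ≠ "")).length := by
  rw [pvRunEnd]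
  by_cases h1 : j < lines.length
  · have getd : lines.getD j "" = lines[j] := List.getD_eq_getElem lines "" h1
    have hdrop := List.drop_eq_getElem_cons h1
    by_cases h2 : lines[j] = ""
    · rw [dif_neg (fun hc => hc.2 (getd.trans h2))]
      rw [hdrop, List.takeWhile_cons_of_neg (by simp [h2])]
      simp
    · rw [dif_pos ⟨h1, fun hc => h2 (getd.symm.trans hc)⟩]
      rw [pvRunEnd_spec lines (j+1) h1, hdrop, List.takeWhile_cons_of_pos (by simp [h2])]
      simp; omega
  · rw [dif_neg (by simp [h1])]
    have : lines.drop j = [] := List.drop_eq_nil_of_le (by omega)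
    simp [this]
  termination_by lines.length - j
  decreasing_by omega

theorem pvCollect_spec (lines : List String) (i : Nat) (acc : List String) (h : i ≤ lines.length) :
    pvCollect lines lines.length i acc = acc ++ pvRef (lines.drop i) := by
  rw [pvCollect]
  by_cases h1 : i < lines.length
  · have getd : lines.getD i "" = lines[i] := List.getD_eq_getElem lines "" h1
    have hdrop := List.drop_eq_getElem_cons h1
    by_cases h2 : lines[i] = ""
    · rw [dif_pos h1, if_neg (fun hc => hc (getd.trans h2))]
      rw [pvCollect_spec lines (i+1) acc h1]
      rw [hdrop]
      conv_rhs => rw [pvRef]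
      simp [h2]
    · rw [dif_pos h1, if_pos (fun hc => h2 (getd.symm.trans hc))]
      have hj := pvRunEnd_spec lines (i+1) (by omega)
      set tw := (lines.drop (i+1)).takeWhile (· ≠ "") with htw
      have hlen : tw.length ≤ lines.length - (i+1) := by
        have := (List.takeWhile_prefix (l := lines.drop (i+1)) (fun x => decide (x ≠ ""))).length_le
        simp only [List.length_drop] at this
        simpa [htw] using this
      have hslice : (lines.drop i).take (pvRunEnd lines lines.length (i+1) - i) = lines[i] :: tw := by
        rw [hj, hdrop]
        have : i + 1 + tw.length - i = tw.length + 1 := by omega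
        rw [this, List.take_succ_cons]
        congr 1
        exact ((List.prefix_iff_eq_take.mp (List.takeWhile_prefix _)).symm)
      have hdropj : lines.drop (pvRunEnd lines lines.length (i+1)) = (lines.drop (i+1)).dropWhile (· ≠ "") := by
        rw [hj, pv_dropWhile_eq_drop, List.drop_drop, ← htw]
        try congr 1
        try omega
      rw [pvCollect_spec lines (pvRunEnd lines lines.length (i+1)) _ (by rw [hj]; omega)]
      rw [hdropj, hslice]
      conv_rhs => rw [hdrop, pvRef]
      rw [if_neg h2]
      simp [htw]
  · rw [dif_neg h1]
    have : lines.drop i = [] := List.drop_eq_nil_of_le (by omega)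
    simp [this, pvRef]
  termination_by lines.length - i
  decreasing_by
  · have := le_pvRunEnd lines lines.length (i+1); omega
  · omega

theorem pv_ports_agree (text : String) :
    split_text_by_paragraphs text = split_text_by_paragraphs_alt text := by
  show (let st := ((PySem.Str.split? text "\n").getD []).foldl pvStepA ([], "");
     let paragraphs := if PySem.Str.strip st.2 ≠ "" then st.1 ++ [PySem.Str.strip st.2] else st.1;
     if paragraphs ≠ [] then paragraphs else [text])
    = (let lines := ((PySem.Str.split? text "\n").getD []).map PySem.Str.strip;
       let paragraphs := pvCollect lines lines.length 0 [];
       if paragraphs ≠ [] then paragraphs else [text])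
  simp only []
  have hA := pvA_main ((PySem.Str.split? text "\n").getD []) [] []
    (by intro w hw; simp at hw)
  simp only [show pvCurOf ([] : List String) = "" from rfl] at hA
  rw [hA, pvRefP_both _ |>.1]
  rw [pvCollect_spec _ 0 [] (by omega)]
  simp

-- ===== VERDICT (by name: the statement is the Claim_ definition above) =====
theorem split_text_by_paragraphs_spec : Claim_equal_split_text_by_paragraphs := by
  intro text _
  unfold Spec_split_text_by_paragraphs
  exact pv_ports_agree text
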